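-- pv_equiv track=rewrite | github.com/DracoRaiden/C-Lexer-Analyzer-with-UI | src/main.py | get_token_stats
-- ===== SOURCE A (Python) =====
-- def get_token_stats(tokens):
--     stats = {
--         'Keyword': 0,
--         'Identifier': 0,
--         'Constant': 0,
--         'Operator': 0,
--     }
--     for _, kind, _ in tokens:
--         if kind == 'Keyword':
--             stats['Keyword'] += 1
--         elif kind == 'Identifier':
--             stats['Identifier'] += 1
--         elif 'Constant' in kind:
--             stats['Constant'] += 1
--         elif 'Operator' in kind:
--             stats['Operator'] += 1
--     return stats
-- ===== SOURCE B (Python) =====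
-- def get_token_stats(tokens):
--     # No mutable dict accumulation: compute the four bucket counts
--     # independently over the kind strings, then build the result at once.
--     # The filters encode the same if/elif priority as the original chain.
--     kinds = [kind for _, kind, _ in tokens]
--     n_kw = kinds.count('Keyword')
--     n_id = kinds.count('Identifier')
--     n_const = sum(1 for k in kinds
--                   if k != 'Keyword' and k != 'Identifier' and 'Constant' in k)
--     n_op = sum(1 for k in kinds
--                if k != 'Keyword' and k != 'Identifier'
--                and 'Constant' not in k and 'Operator' in k)
--     return {'Keyword': n_kw, 'Identifier': n_id,
--             'Constant': n_const, 'Operator': n_op}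
-- ===== Notes on version B (the rewrite author's own statement) =====
-- stated objective: alternative
-- what changed: A threads one mutable stats dict through a per-token if/elif classification; B computes the four bucket totals independently with count()/filtered sums over the extracted kind strings (encoding the same priority in the filters) and builds the result dict once at the end.
import Mathlib
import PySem

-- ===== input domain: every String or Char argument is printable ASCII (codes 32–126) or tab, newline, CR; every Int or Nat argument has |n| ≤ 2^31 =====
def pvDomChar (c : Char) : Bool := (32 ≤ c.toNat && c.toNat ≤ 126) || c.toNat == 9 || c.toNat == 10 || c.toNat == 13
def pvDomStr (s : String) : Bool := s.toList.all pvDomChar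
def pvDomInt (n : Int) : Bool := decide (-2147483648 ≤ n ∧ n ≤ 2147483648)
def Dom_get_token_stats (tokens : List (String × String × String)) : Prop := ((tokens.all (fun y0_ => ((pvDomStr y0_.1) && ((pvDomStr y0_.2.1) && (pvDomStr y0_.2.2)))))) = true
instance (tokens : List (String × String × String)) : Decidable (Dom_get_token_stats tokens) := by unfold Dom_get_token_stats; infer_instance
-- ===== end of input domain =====

-- B replaces A's single pass that mutates a stats dict per token by four
-- independent count/filter passes over the kind strings (same priority encoded
-- in the filters), building the result dict once at the end; alternative shape.

-- ===== PORT A =====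
-- loop body of A's single for-loop (stats[k] += 1 ported as insert of getD+1; the key is always present)
def aStep (stats : PySem.Dict String Int) (t : String × String × String) : PySem.Dict String Int :=
  let kind := t.2.1
  if kind == "Keyword" then stats.insert "Keyword" (stats.getD "Keyword" 0 + 1)
  else if kind == "Identifier" then stats.insert "Identifier" (stats.getD "Identifier" 0 + 1)
  else if PySem.Str.isIn "Constant" kind then stats.insert "Constant" (stats.getD "Constant" 0 + 1)
  else if PySem.Str.isIn "Operator" kind then stats.insert "Operator" (stats.getD "Operator" 0 + 1)
  else stats

def get_token_stats (tokens : List (String × String × String)) : List (String × Int) :=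
  let stats : PySem.Dict String Int :=
    PySem.Dict.ofList [("Keyword", 0), ("Identifier", 0), ("Constant", 0), ("Operator", 0)]
  let stats := tokens.foldl aStep stats
  stats.items

-- ===== PORT B =====
def get_token_stats_alt (tokens : List (String × String × String)) : List (String × Int) :=
  let kinds := tokens.map (fun t => t.2.1)
  let n_kw : Int := kinds.count "Keyword"
  let n_id : Int := kinds.count "Identifier"
  -- sum(1 for k in kinds if …) ported as length of the filtered list
  let n_const : Int := (kinds.filter (fun k =>
      !(k == "Keyword") && !(k == "Identifier") && PySem.Str.isIn "Constant" k)).length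
  let n_op : Int := (kinds.filter (fun k =>
      !(k == "Keyword") && !(k == "Identifier") && !(PySem.Str.isIn "Constant" k)
        && PySem.Str.isIn "Operator" k)).length
  [("Keyword", n_kw), ("Identifier", n_id), ("Constant", n_const), ("Operator", n_op)]

-- ===== PRECONDITION & SPEC =====
def Spec_get_token_stats (tokens : List (String × String × String)) (out : List (String × Int)) : Prop := out = get_token_stats_alt tokens
instance (tokens : List (String × String × String)) (out : List (String × Int)) : Decidable (Spec_get_token_stats tokens out) := by unfold Spec_get_token_stats; infer_instance

-- ===== CLAIM (what is proved, stated in full; the proofs are below) =====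
def Claim_equal_get_token_stats : Prop := ∀ (tokens : List (String × String × String)), Dom_get_token_stats tokens → Spec_get_token_stats tokens (get_token_stats tokens)

-- ===== LEMMAS AND PROOFS =====

-- the four-key stats dict with symbolic values
def mk4 (a b c d : Int) : PySem.Dict String Int :=
  PySem.Dict.ofList [("Keyword", a), ("Identifier", b), ("Constant", c), ("Operator", d)]

-- the prioritized classification predicates of A's if/elif chain
def q0 (k : String) : Bool := k == "Keyword"
def q1 (k : String) : Bool := !(k == "Keyword") && (k == "Identifier")
def q2 (k : String) : Bool := !(k == "Keyword") && !(k == "Identifier") && PySem.Str.isIn "Constant" k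
def q3 (k : String) : Bool := !(k == "Keyword") && !(k == "Identifier") && !(PySem.Str.isIn "Constant" k) && PySem.Str.isIn "Operator" k

theorem items_mk4 (a b c d : Int) :
    (mk4 a b c d).items = [("Keyword", a), ("Identifier", b), ("Constant", c), ("Operator", d)] := rfl

theorem mk4_inj {a b c d a' b' c' d' : Int} :
    mk4 a b c d = mk4 a' b' c' d' ↔ (a = a' ∧ b = b' ∧ c = c' ∧ d = d') := by
  constructor
  · intro h
    have h' := congrArg PySem.Dict.items h
    rw [items_mk4, items_mk4] at h'
    simpa using h'
  · rintro ⟨rfl, rfl, rfl, rfl⟩; rfl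

theorem aStep_mk4 (a b c d : Int) (t : String × String × String) :
    aStep (mk4 a b c d) t =
      mk4 (a + if q0 t.2.1 then 1 else 0) (b + if q1 t.2.1 then 1 else 0)
          (c + if q2 t.2.1 then 1 else 0) (d + if q3 t.2.1 then 1 else 0) := by
  unfold aStep q0 q1 q2 q3
  cases h0 : t.2.1 == "Keyword" <;>
  cases h1 : t.2.1 == "Identifier" <;>
  cases h2 : PySem.Str.isIn "Constant" t.2.1 <;>
  cases h3 : PySem.Str.isIn "Operator" t.2.1 <;>
  simp only [h0, h1, h2, h3, Bool.not_true, Bool.not_false, Bool.false_eq_true, if_true, if_false,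
    Bool.and_true, Bool.and_false, add_zero] <;> rfl

theorem foldA (ts : List (String × String × String)) : ∀ (a b c d : Int),
    ts.foldl aStep (mk4 a b c d) =
      mk4 (a + (ts.countP (fun t => q0 t.2.1) : Int)) (b + (ts.countP (fun t => q1 t.2.1) : Int))
          (c + (ts.countP (fun t => q2 t.2.1) : Int)) (d + (ts.countP (fun t => q3 t.2.1) : Int)) := by
  induction ts with
  | nil => intro a b c d; simp
  | cons t ts ih =>
    intro a b c d
    rw [List.foldl_cons, aStep_mk4, ih, mk4_inj]
    simp only [List.countP_cons]
    refine ⟨?_, ?_, ?_, ?_⟩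
    · cases h : q0 t.2.1 <;> simp <;> ring
    · cases h : q1 t.2.1 <;> simp <;> ring
    · cases h : q2 t.2.1 <;> simp <;> ring
    · cases h : q3 t.2.1 <;> simp <;> ring

-- counting "Identifier" directly agrees with A's second elif-branch predicate
theorem q1_eq (k : String) : (k == "Identifier") = q1 k := by
  unfold q1
  by_cases h : k = "Identifier"
  · subst h; decide
  · simp [h]

-- ===== VERDICT (by name: the statement is the Claim_ definition above) =====
theorem get_token_stats_spec : Claim_equal_get_token_stats := by
  intro tokens _
  show (tokens.foldl aStep (mk4 0 0 0 0)).items = get_token_stats_alt tokens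
  rw [foldA, items_mk4]
  unfold get_token_stats_alt q0 q2 q3
  have hid : List.countP (fun t : String × String × String => q1 t.2.1) tokens
      = List.countP (fun t : String × String × String => t.2.1 == "Identifier") tokens :=
    List.countP_congr (fun a _ => by rw [q1_eq])
  simp only [List.count_eq_countP, List.countP_map, ← List.countP_eq_length_filter,
    Function.comp_def, zero_add, hid]
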